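-- pv_equiv track=rewrite | github.com/simonpainter/AdventOfCode | 2015/16/day16.py | part2
-- ===== SOURCE A (Python) =====
-- def part2(input):
--     # MFCSAM readings
--     mfcsam = {
--         'children': 3,
--         'cats': 7,
--         'samoyeds': 2,
--         'pomeranians': 3,
--         'akitas': 0,
--         'vizslas': 0,
--         'goldfish': 5,
--         'trees': 3,
--         'cars': 2,
--         'perfumes': 1
--     }
--
--     # Check each aunt against the readings
--     for sue_num, properties in input.items():
--         matches = True
--         for prop, value in properties.items():
--             # Special cases for cats and trees (greater than)
--             if prop == 'cats' or prop == 'trees':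
--                 if value <= mfcsam[prop]:
--                     matches = False
--                     break
--             # Special cases for pomeranians and goldfish (fewer than)
--             elif prop == 'pomeranians' or prop == 'goldfish':
--                 if value >= mfcsam[prop]:
--                     matches = False
--                     break
--             # All other properties must match exactly
--             elif mfcsam[prop] != value:
--                 matches = False
--                 break
--         if matches:
--             return sue_num
--
--     return None
-- ===== SOURCE B (Python) =====
-- def part2(input):
--     # MFCSAM readings
--     mfcsam = {
--         'children': 3,
--         'cats': 7,
--         'samoyeds': 2,
--         'pomeranians': 3,
--         'akitas': 0,
--         'vizslas': 0,
--         'goldfish': 5,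
--         'trees': 3,
--         'cars': 2,
--         'perfumes': 1
--     }
--     # Sieve: start with all aunts and eliminate, one MFCSAM reading at a time,
--     # every aunt whose listed value for that reading contradicts it.
--     survivors = list(input.items())
--     for prop, target in mfcsam.items():
--         if prop in ('cats', 'trees'):
--             ok = lambda v, t=target: v > t
--         elif prop in ('pomeranians', 'goldfish'):
--             ok = lambda v, t=target: v < t
--         else:
--             ok = lambda v, t=target: v == t
--         survivors = [(num, props) for num, props in survivors
--                      if prop not in props or ok(props[prop])]
--     return survivors[0][0] if survivors else None
-- ===== Notes on version B (the rewrite author's own statement) =====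
-- stated objective: alternative
-- what changed: Inverted the traversal: instead of scanning each aunt's properties against the readings with an if/elif chain and early return, B runs a sieve over the ten MFCSAM readings, filtering the whole candidate list once per reading (ten staged passes over a shrinking list) and returning the first survivor.
import Mathlib
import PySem

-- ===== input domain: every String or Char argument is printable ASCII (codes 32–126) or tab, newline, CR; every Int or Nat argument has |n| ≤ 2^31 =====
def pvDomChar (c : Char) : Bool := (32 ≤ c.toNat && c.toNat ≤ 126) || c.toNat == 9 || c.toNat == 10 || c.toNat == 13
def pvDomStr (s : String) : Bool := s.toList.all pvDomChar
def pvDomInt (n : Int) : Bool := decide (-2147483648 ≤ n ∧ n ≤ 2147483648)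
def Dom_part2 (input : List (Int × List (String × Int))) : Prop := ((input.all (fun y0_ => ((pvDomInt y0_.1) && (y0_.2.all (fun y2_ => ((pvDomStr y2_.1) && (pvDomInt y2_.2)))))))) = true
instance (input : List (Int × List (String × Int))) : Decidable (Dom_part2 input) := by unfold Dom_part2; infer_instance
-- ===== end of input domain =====

-- B inverts the traversal: a sieve that filters the whole candidate list once per MFCSAM
-- reading (ten staged passes) and returns the first survivor, instead of A's per-aunt scan
-- with an if/elif chain and early return; objective: alternative. Return value only.

-- the MFCSAM readings, shared literal data of both programs (A's dict, B's .items() list)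
def pvMFCSAMItems : List (String × Int) :=
  [("children", 3), ("cats", 7), ("samoyeds", 2), ("pomeranians", 3),
   ("akitas", 0), ("vizslas", 0), ("goldfish", 5), ("trees", 3),
   ("cars", 2), ("perfumes", 1)]

def pvMFCSAM : PySem.Dict String Int := PySem.Dict.ofList pvMFCSAMItems

-- ===== PORT A =====
-- A's inner for-loop over one aunt's properties, with the `matches`/break flow folded into
-- the recursion; `none` from mfcsam[prop] is Python's KeyError — excluded by Pre_part2,
-- rendered here as a non-match.
def pvCheckA : List (String × Int) → Bool
  | [] => true
  | (prop, value) :: rest =>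
    if prop == "cats" || prop == "trees" then
      if value ≤ (pvMFCSAM.get? prop).getD 0 then false else pvCheckA rest
    else if prop == "pomeranians" || prop == "goldfish" then
      if value ≥ (pvMFCSAM.get? prop).getD 0 then false else pvCheckA rest
    else
      match pvMFCSAM.get? prop with
      | none => false  -- KeyError in Python; outside Pre_part2
      | some t => if t ≠ value then false else pvCheckA rest

def part2 : List (Int × List (String × Int)) → Option Int
  | [] => none
  | (sue_num, properties) :: rest =>
    if pvCheckA properties then some sue_num else part2 rest

-- ===== PORT B =====
-- the chosen comparator for one reading: `ok(props[prop])` of Source B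
def pvOk (prop : String) (target v : Int) : Bool :=
  if prop == "cats" || prop == "trees" then target < v
  else if prop == "pomeranians" || prop == "goldfish" then v < target
  else v == target

-- the filter condition of one sieve pass: `prop not in props or ok(props[prop])`
def pvSieveOk (pt : String × Int) (props : List (String × Int)) : Bool :=
  match (PySem.Dict.mk props).get? pt.1 with
  | none => true
  | some v => pvOk pt.1 pt.2 v

def part2_alt (input : List (Int × List (String × Int))) : Option Int :=
  let survivors := pvMFCSAMItems.foldl
    (fun surv pt => surv.filter (fun a => pvSieveOk pt a.2)) input
  match survivors with
  | [] => none
  | a :: _ => some a.1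

-- ===== PRECONDITION & SPEC =====
def pvKnownProps : List String :=
  ["children", "cats", "samoyeds", "pomeranians", "akitas", "vizslas", "goldfish", "trees", "cars", "perfumes"]

-- q's value contradicts its (known) MFCSAM reading, i.e. A's inner loop breaks at q
def pvFailsReading (q : String × Int) : Bool :=
  (q.1 == "cats" && q.2 ≤ 7) || (q.1 == "trees" && q.2 ≤ 3) ||
  (q.1 == "pomeranians" && 3 ≤ q.2) || (q.1 == "goldfish" && 5 ≤ q.2) ||
  (q.1 == "children" && q.2 != 3) || (q.1 == "samoyeds" && q.2 != 2) ||
  (q.1 == "akitas" && q.2 != 0) || (q.1 == "vizslas" && q.2 != 0) ||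
  (q.1 == "cars" && q.2 != 2) || (q.1 == "perfumes" && q.2 != 1)

-- the aunt's readings are all known and none contradicts the MFCSAM value
def pvAuntMatches (props : List (String × Int)) : Bool :=
  props.all (fun q => decide (q.1 ∈ pvKnownProps) && !pvFailsReading q)

-- A's scan of this aunt never reaches an unknown property name: either every name is
-- known, or a contradicted known reading occurs before the first unknown name
def pvAuntSafe (props : List (String × Int)) : Bool :=
  props.all (fun q => decide (q.1 ∈ pvKnownProps)) ||
  (props.takeWhile (fun q => decide (q.1 ∈ pvKnownProps))).any pvFailsReading

-- Pre_ excludes (a) inputs on which A's scan reaches a property name outside the ten MFCSAM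
-- readings — there Python A raises KeyError (the condition below is exact: aunts are checked
-- only up to the first matching one, and an aunt's readings only up to its first break) —
-- and (b) inputs with duplicate aunt ids or duplicate property names, where the Python dicts
-- collapse duplicates and the association-list representation is ambiguous.
def Pre_part2 (input : List (Int × List (String × Int))) : Prop :=
  (input.map Prod.fst).Nodup ∧
  (∀ a ∈ input, (a.2.map Prod.fst).Nodup) ∧
  ∀ a ∈ input.takeWhile (fun a => !pvAuntMatches a.2), pvAuntSafe a.2 = true
instance (input : List (Int × List (String × Int))) : Decidable (Pre_part2 input) := by
  unfold Pre_part2; infer_instance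

def pvWitness_part2 : (List (Int × List (String × Int))) :=
  [(1, [("cats", 8), ("goldfish", 2)]), (2, [("children", 3)])]

def Spec_part2 (input : List (Int × List (String × Int))) (out : Option Int) : Prop := out = part2_alt input
instance (input : List (Int × List (String × Int))) (out : Option Int) : Decidable (Spec_part2 input out) := by unfold Spec_part2; infer_instance

-- ===== CLAIM =====
def Claim_equal_part2 : Prop := ∀ (input : List (Int × List (String × Int))), Dom_part2 input → Pre_part2 input → Spec_part2 input (part2 input)

-- ===== LEMMAS AND PROOFS =====

-- B's aunt-survives-all-ten-sieves condition
def pvBig (props : List (String × Int)) : Bool :=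
  pvMFCSAMItems.all (fun pt => pvSieveOk pt props)

-- the ten staged filters amount to one filter by the conjunction of the ten conditions
theorem foldl_filter {α β : Type} (f : α → β → Bool) (ps : List α) (xs : List β) :
    ps.foldl (fun s p => s.filter (f p)) xs
      = xs.filter (fun b => ps.all (fun p => f p b)) := by
  induction ps generalizing xs with
  | nil => simp
  | cons p ps ih =>
    simp only [List.foldl_cons, ih, List.filter_filter, List.all_cons]
    exact List.filter_congr (fun b _ => by simp [Bool.and_comm])

theorem part2_alt_eq_filter (input : List (Int × List (String × Int))) :
    part2_alt input
      = match input.filter (fun a => pvBig a.2) with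
        | [] => none
        | a :: _ => some a.1 := by
  simp only [part2_alt, foldl_filter, pvBig]

-- A's scan with break computes the same Bool as "all readings known and none fails"
theorem checkA_eq_matches (props : List (String × Int)) :
    pvCheckA props = pvAuntMatches props := by
  induction props with
  | nil => rfl
  | cons q rest ih =>
    obtain ⟨p, v⟩ := q
    by_cases h1 : p = "cats"
    · subst h1
      have hm : (pvMFCSAM.get? "cats").getD 0 = 7 := by decide
      simp only [pvCheckA, pvAuntMatches, List.all_cons, hm]
      by_cases h : v ≤ 7 <;>
        simp [h, pvFailsReading, pvKnownProps, pvAuntMatches] at ih ⊢ <;> omega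
    · by_cases h2 : p = "trees"
      · subst h2
        have hm : (pvMFCSAM.get? "trees").getD 0 = 3 := by decide
        simp only [pvCheckA, pvAuntMatches, List.all_cons, hm]
        by_cases h : v ≤ 3 <;>
          simp [h, pvFailsReading, pvKnownProps, pvAuntMatches] at ih ⊢ <;> omega
      · by_cases h3 : p = "pomeranians"
        · subst h3
          have hm : (pvMFCSAM.get? "pomeranians").getD 0 = 3 := by decide
          simp only [pvCheckA, pvAuntMatches, List.all_cons, hm]
          by_cases h : 3 ≤ v <;>
            simp [h, pvFailsReading, pvKnownProps, pvAuntMatches] at ih ⊢ <;> omega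
        · by_cases h4 : p = "goldfish"
          · subst h4
            have hm : (pvMFCSAM.get? "goldfish").getD 0 = 5 := by decide
            simp only [pvCheckA, pvAuntMatches, List.all_cons, hm]
            by_cases h : 5 ≤ v <;>
              simp [h, pvFailsReading, pvKnownProps, pvAuntMatches] at ih ⊢ <;> omega
          · -- the generic branch: the remaining six known names, or an unknown name
            simp only [pvCheckA, pvAuntMatches, List.all_cons] at ih ⊢
            rw [if_neg (by simp [h1, h2]), if_neg (by simp [h3, h4])]
            by_cases h5 : p = "children"
            · subst h5; have hm : pvMFCSAM.get? "children" = some 3 := by decide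
              by_cases h : v = 3
              · simp [hm, h, pvFailsReading, pvKnownProps] at ih ⊢; exact ih
              · simp [hm, h, Ne.symm h, pvFailsReading, pvKnownProps]
            · by_cases h6 : p = "samoyeds"
              · subst h6; have hm : pvMFCSAM.get? "samoyeds" = some 2 := by decide
                by_cases h : v = 2
                · simp [hm, h, pvFailsReading, pvKnownProps] at ih ⊢; exact ih
                · simp [hm, h, Ne.symm h, pvFailsReading, pvKnownProps]
              · by_cases h7 : p = "akitas"
                · subst h7; have hm : pvMFCSAM.get? "akitas" = some 0 := by decide
                  by_cases h : v = 0
                  · simp [hm, h, pvFailsReading, pvKnownProps] at ih ⊢; exact ih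
                  · simp [hm, h, Ne.symm h, pvFailsReading, pvKnownProps]
                · by_cases h8 : p = "vizslas"
                  · subst h8; have hm : pvMFCSAM.get? "vizslas" = some 0 := by decide
                    by_cases h : v = 0
                    · simp [hm, h, pvFailsReading, pvKnownProps] at ih ⊢; exact ih
                    · simp [hm, h, Ne.symm h, pvFailsReading, pvKnownProps]
                  · by_cases h9 : p = "cars"
                    · subst h9; have hm : pvMFCSAM.get? "cars" = some 2 := by decide
                      by_cases h : v = 2
                      · simp [hm, h, pvFailsReading, pvKnownProps] at ih ⊢; exact ih
                      · simp [hm, h, Ne.symm h, pvFailsReading, pvKnownProps]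
                    · by_cases h10 : p = "perfumes"
                      · subst h10; have hm : pvMFCSAM.get? "perfumes" = some 1 := by decide
                        by_cases h : v = 1
                        · simp [hm, h, pvFailsReading, pvKnownProps] at ih ⊢; exact ih
                        · simp [hm, h, Ne.symm h, pvFailsReading, pvKnownProps]
                      · -- unknown name: get? = none on the left, p ∉ pvKnownProps on the right
                        have hm : pvMFCSAM.get? p = none := by
                          simp [pvMFCSAM, pvMFCSAMItems, PySem.Dict.ofList, PySem.Dict.update,
                                PySem.Dict.get?_insert, h1, h2, h3, h4, h5, h6, h7, h8, h9, h10]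
                        simp [hm, pvKnownProps, h1, h2, h3, h4, h5, h6, h7, h8, h9, h10]

-- for a known reading, B's chosen comparator is exactly "does not contradict the reading"
theorem ok_eq_not_fails (p : String) (t v : Int) (hpt : (p, t) ∈ pvMFCSAMItems) :
    pvOk p t v = !pvFailsReading (p, v) := by
  simp only [pvMFCSAMItems, List.mem_cons, List.not_mem_nil, or_false, Prod.mk.injEq] at hpt
  rcases hpt with ⟨hp, ht⟩|⟨hp, ht⟩|⟨hp, ht⟩|⟨hp, ht⟩|⟨hp, ht⟩|⟨hp, ht⟩|⟨hp, ht⟩|⟨hp, ht⟩|⟨hp, ht⟩|⟨hp, ht⟩ <;>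
    subst hp <;> subst ht <;> simp [pvOk, pvFailsReading] <;> rw [Bool.eq_iff_iff] <;> simp

-- every known property name carries a reading
theorem exists_target (p : String) (hp : p ∈ pvKnownProps) :
    ∃ t, (p, t) ∈ pvMFCSAMItems := by
  simp only [pvKnownProps, List.mem_cons, List.not_mem_nil, or_false] at hp
  rcases hp with h|h|h|h|h|h|h|h|h|h <;> subst h <;>
    first
    | exact ⟨3, by decide⟩ | exact ⟨7, by decide⟩
    | exact ⟨2, by decide⟩ | exact ⟨0, by decide⟩
    | exact ⟨5, by decide⟩ | exact ⟨1, by decide⟩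

-- one listed, known, contradicted reading sinks the aunt in B's sieve
theorem big_false_of_fail (props : List (String × Int)) (p : String) (v : Int)
    (hnd : (props.map Prod.fst).Nodup) (hmem : (p, v) ∈ props)
    (hp : p ∈ pvKnownProps) (hf : pvFailsReading (p, v) = true) :
    pvBig props = false := by
  obtain ⟨t, hpt⟩ := exists_target p hp
  have hget : (PySem.Dict.mk props).get? p = some v :=
    PySem.Dict.get?_of_mem_items (d := PySem.Dict.mk props) hmem hnd
  have : pvSieveOk (p, t) props = false := by
    simp [pvSieveOk, hget, ok_eq_not_fails p t v hpt, hf]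
  refine List.all_eq_false.mpr ⟨(p, t), hpt, ?_⟩
  simp [this]

-- a fully matching aunt survives every sieve pass
theorem big_true_of_matches (props : List (String × Int))
    (hm : pvAuntMatches props = true) : pvBig props = true := by
  simp only [pvBig, List.all_eq_true]
  intro pt hpt
  simp only [pvSieveOk]
  cases hget : (PySem.Dict.mk props).get? pt.1 with
  | none => rfl
  | some v =>
    have hmem : (pt.1, v) ∈ props :=
      PySem.Dict.mem_items_of_get?_eq_some (d := PySem.Dict.mk props) hget
    have hq := (List.all_eq_true.mp hm) (pt.1, v) hmem
    simp only [Bool.and_eq_true] at hq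
    have hok := ok_eq_not_fails pt.1 pt.2 v (by obtain ⟨a, b⟩ := pt; exact hpt)
    simp only [hok]
    exact hq.2

-- per-aunt agreement: on a safe, duplicate-free aunt the sieve verdict is A's verdict
theorem big_eq_matches (props : List (String × Int))
    (hnd : (props.map Prod.fst).Nodup) (hs : pvAuntSafe props = true) :
    pvBig props = pvAuntMatches props := by
  cases hm : pvAuntMatches props with
  | true => exact big_true_of_matches props hm
  | false =>
    simp only [pvAuntSafe, Bool.or_eq_true] at hs
    rcases hs with hall | hany
    · -- all names known, so some listed known reading must fail
      obtain ⟨⟨p, v⟩, hmemq, hq⟩ := List.all_eq_false.mp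
        (show props.all (fun q => decide (q.1 ∈ pvKnownProps) && !pvFailsReading q) = false from hm)
      have hp : p ∈ pvKnownProps := by
        have := (List.all_eq_true.mp hall) (p, v) hmemq
        simpa using this
      have hf : pvFailsReading (p, v) = true := by
        simp [hp] at hq
        exact hq
      exact big_false_of_fail props p v hnd hmemq hp hf
    · -- a contradicted known reading occurs in the all-known prefix
      obtain ⟨⟨p, v⟩, hmemt, hf⟩ := List.any_eq_true.mp hany
      have hp : p ∈ pvKnownProps := by
        have := List.mem_takeWhile_imp hmemt
        simpa using this
      exact big_false_of_fail props p v hnd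
        ((List.takeWhile_sublist _).subset hmemt) hp hf

theorem part2_eq (input : List (Int × List (String × Int))) (hpre : Pre_part2 input) :
    part2 input = part2_alt input := by
  induction input with
  | nil => rfl
  | cons a rest ih =>
    obtain ⟨s, props⟩ := a
    obtain ⟨hids, hnds, hsafe⟩ := hpre
    rw [part2_alt_eq_filter]
    cases hc : pvCheckA props with
    | true =>
      have hb : pvBig props = true :=
        big_true_of_matches props (checkA_eq_matches props ▸ hc)
      simp [part2, hc, hb]
    | false =>
      have hm : pvAuntMatches props = false := checkA_eq_matches props ▸ hc
      have hmem : ((s, props) : Int × List (String × Int)) ∈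
          ((s, props) :: rest).takeWhile (fun a => !pvAuntMatches a.2) := by
        rw [List.takeWhile_cons_of_pos (by simp [hm])]
        exact List.mem_cons_self
      have hs : pvAuntSafe props = true := hsafe _ hmem
      have hb : pvBig props = false := by
        rw [big_eq_matches props (hnds _ List.mem_cons_self) hs, hm]
      have hrest : part2 rest = part2_alt rest := by
        apply ih
        refine ⟨(List.nodup_cons.mp hids).2, fun b hb' => hnds b (List.mem_cons_of_mem _ hb'), ?_⟩
        intro b hb'
        apply hsafe
        rw [List.takeWhile_cons_of_pos (by simp [hm])]
        exact List.mem_cons_of_mem _ hb'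
      rw [part2_alt_eq_filter] at hrest
      simp [part2, hc, hb, hrest]

-- ===== VERDICT =====
theorem part2_spec : Claim_equal_part2 := by
  intro input _ hpre
  exact part2_eq input hpre
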